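-- pv_equiv track=rewrite | github.com/aaryaman005/Project-Athena | backend/core/mock_data.py | generate_group_memberships
-- ===== SOURCE A (Python) =====
-- from typing import List, Dict, Any
--
-- def generate_group_memberships(users: List[Dict], groups: List[Dict]) -> Dict[str, List[str]]:
--     """Generate realistic group memberships"""
--     memberships = {}
--     for group in groups:
--         memberships[group['GroupName']] = []
--
--     for user in users:
--         dept = user.get('department')
--         # Map departments to groups
--         group_name = None
--         if dept == 'engineering':
--             group_name = 'Engineering'
--         elif dept == 'data_science':
--             group_name = 'DataScience'
--         elif dept == 'finance':
--             group_name = 'Finance'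
--         elif dept == 'hr':
--             group_name = 'HR'
--         elif dept == 'interns':
--             group_name = 'Interns'
--         elif dept == 'contractors':
--             group_name = 'Contractors'
--
--         if group_name and group_name in memberships:
--             memberships[group_name].append(user['UserName'])
--
--     return memberships
-- ===== SOURCE B (Python) =====
-- GROUP_FOR_DEPT = {
--     'engineering': 'Engineering',
--     'data_science': 'DataScience',
--     'finance': 'Finance',
--     'hr': 'HR',
--     'interns': 'Interns',
--     'contractors': 'Contractors',
-- }
--
-- def generate_group_memberships(users, groups):
--     """Generate group memberships: one scan of users per group, driven by a
--     constant department->group table instead of an if/elif chain."""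
--     return {
--         g['GroupName']: [u['UserName'] for u in users
--                          if GROUP_FOR_DEPT.get(u.get('department')) == g['GroupName']]
--         for g in groups
--     }
-- ===== Notes on version B (the rewrite author's own statement) =====
-- stated objective: idiomatic
-- what changed: Replaces A's two sequential passes (pre-seed a dict with empty lists, then a single accumulating pass over users with an if/elif department chain appending in place) by a dict comprehension over groups that, for each group, scans all users and selects members via a constant department->group table.
import Mathlib
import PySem

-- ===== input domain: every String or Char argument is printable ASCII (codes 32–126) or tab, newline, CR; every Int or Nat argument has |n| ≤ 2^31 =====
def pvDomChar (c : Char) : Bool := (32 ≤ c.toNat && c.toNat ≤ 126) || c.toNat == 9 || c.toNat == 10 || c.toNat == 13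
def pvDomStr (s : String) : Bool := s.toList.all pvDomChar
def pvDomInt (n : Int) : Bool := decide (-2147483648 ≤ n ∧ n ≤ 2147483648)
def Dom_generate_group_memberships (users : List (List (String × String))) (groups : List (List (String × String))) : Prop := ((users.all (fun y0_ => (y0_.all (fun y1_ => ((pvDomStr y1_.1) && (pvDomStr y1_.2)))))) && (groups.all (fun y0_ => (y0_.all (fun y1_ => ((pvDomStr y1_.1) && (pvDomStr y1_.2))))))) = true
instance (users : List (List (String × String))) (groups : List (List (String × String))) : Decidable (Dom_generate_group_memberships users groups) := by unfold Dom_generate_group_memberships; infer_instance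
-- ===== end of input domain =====

-- B replaces A's seed-then-accumulate single pass over users by a per-group scan of users
-- driven by a constant department->group table (idiomatic; same return value).

-- ===== PORT A =====
-- the if/elif department chain of A, as a helper
def deptToGroup (dept : Option String) : Option String :=
  if dept = some "engineering" then some "Engineering"
  else if dept = some "data_science" then some "DataScience"
  else if dept = some "finance" then some "Finance"
  else if dept = some "hr" then some "HR"
  else if dept = some "interns" then some "Interns"
  else if dept = some "contractors" then some "Contractors"
  else none

def generate_group_memberships (users : List (List (String × String))) (groups : List (List (String × String))) : List (String × List String) :=
  -- memberships = {}; for group in groups: memberships[group['GroupName']] = []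
  let m0 : PySem.Dict String (List String) :=
    groups.foldl (fun d g => d.insert ((PySem.Dict.mk g).getD "GroupName" "") []) PySem.Dict.empty
  -- for user in users: … if group_name and group_name in memberships: append user['UserName']
  let m1 : PySem.Dict String (List String) :=
    users.foldl (fun d u =>
      match deptToGroup ((PySem.Dict.mk u).get? "department") with
      | some gn =>
          if d.contains gn then
            d.modify gn [] (fun l => l ++ [(PySem.Dict.mk u).getD "UserName" ""])
          else d
      | none => d) m0
  m1.items

-- ===== PORT B =====
def GROUP_FOR_DEPT : PySem.Dict String String :=
  PySem.Dict.mk [("engineering", "Engineering"), ("data_science", "DataScience"),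
                 ("finance", "Finance"), ("hr", "HR"),
                 ("interns", "Interns"), ("contractors", "Contractors")]

def generate_group_memberships_alt (users : List (List (String × String))) (groups : List (List (String × String))) : List (String × List String) :=
  (groups.foldl (fun d g =>
      let gn := (PySem.Dict.mk g).getD "GroupName" ""
      d.insert gn
        (users.filterMap (fun u =>
          if ((PySem.Dict.mk u).get? "department").bind (fun dp => GROUP_FOR_DEPT.get? dp) = some gn
          then some ((PySem.Dict.mk u).getD "UserName" "") else none)))
    PySem.Dict.empty).items

-- ===== PRECONDITION & SPEC =====
-- Pre_ excludes exactly the inputs on which Python A (and B) raises KeyError: a group without the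
-- 'GroupName' key, or a user whose mapped department names a present group but who lacks 'UserName'.
def Pre_generate_group_memberships (users : List (List (String × String))) (groups : List (List (String × String))) : Prop :=
  (groups.all (fun g => (g.map (·.1)).contains "GroupName")) = true ∧
  (users.all (fun u =>
    match deptToGroup ((PySem.Dict.mk u).get? "department") with
    | some gn =>
        !(groups.map (fun g => (PySem.Dict.mk g).getD "GroupName" "")).contains gn
        || (u.map (·.1)).contains "UserName"
    | none => true)) = true

instance (users : List (List (String × String))) (groups : List (List (String × String))) : Decidable (Pre_generate_group_memberships users groups) := by unfold Pre_generate_group_memberships; infer_instance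

def pvWitness_generate_group_memberships : (List (List (String × String))) × (List (List (String × String))) :=
  ([[("department", "engineering"), ("UserName", "alice")], [("department", "sales")]],
   [[("GroupName", "Engineering")], [("GroupName", "HR")]])

def Spec_generate_group_memberships (users : List (List (String × String))) (groups : List (List (String × String))) (out : List (String × List String)) : Prop := out = generate_group_memberships_alt users groups
instance (users : List (List (String × String))) (groups : List (List (String × String))) (out : List (String × List String)) : Decidable (Spec_generate_group_memberships users groups out) := by unfold Spec_generate_group_memberships; infer_instance

-- ===== CLAIM (what is proved, stated in full; the proofs are below) =====
def Claim_equal_generate_group_memberships : Prop := ∀ (users : List (List (String × String))) (groups : List (List (String × String))), Dom_generate_group_memberships users groups → Pre_generate_group_memberships users groups → Spec_generate_group_memberships users groups (generate_group_memberships users groups)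

-- ===== LEMMAS AND PROOFS =====

-- the if/elif chain of A computes the same group as B's table lookup
theorem dept_eq (o : Option String) :
    o.bind (fun dp => GROUP_FOR_DEPT.get? dp) = deptToGroup o := by
  cases o with
  | none => simp [deptToGroup]
  | some s =>
    simp only [Option.bind, deptToGroup, GROUP_FOR_DEPT, PySem.Dict.get?_mk_cons]
    split_ifs <;> simp_all [beq_iff_eq, PySem.Dict.get?]

def uname (u : List (String × String)) : String := (PySem.Dict.mk u).getD "UserName" ""
def udept (u : List (String × String)) : Option String :=
  deptToGroup ((PySem.Dict.mk u).get? "department")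
def gname (g : List (String × String)) : String := (PySem.Dict.mk g).getD "GroupName" ""

-- the members of group k, as B computes them
def memberF (users : List (List (String × String))) (k : String) : List String :=
  users.filterMap (fun u => if udept u = some k then some (uname u) else none)

-- A's per-user step
def stepA (d : PySem.Dict String (List String)) (u : List (String × String)) :
    PySem.Dict String (List String) :=
  match udept u with
  | some gn => if d.contains gn then d.modify gn [] (fun l => l ++ [uname u]) else d
  | none => d

-- A's user loop never changes the key list
theorem keysA (us : List (List (String × String))) (d : PySem.Dict String (List String)) :
    (us.foldl stepA d).keys = d.keys := by
  induction us generalizing d with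
  | nil => rfl
  | cons u us ih =>
    rw [List.foldl_cons, ih]
    cases h : udept u with
    | none => rw [show stepA d u = d by unfold stepA; rw [h]]
    | some gn =>
      by_cases hc : d.contains gn = true
      · rw [show stepA d u = d.modify gn [] (fun l => l ++ [uname u]) by
          unfold stepA; rw [h]; simp [hc]]
        rw [PySem.Dict.keys_modify, PySem.Dict.keys_insert_of_contains _ _ hc]
      · rw [show stepA d u = d by unfold stepA; rw [h]; simp [hc]]

-- invariant of A's user loop: each present key accumulates exactly B's member list
theorem getDA (us : List (List (String × String))) (d : PySem.Dict String (List String))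
    (k : String) (hk : k ∈ d.keys) :
    (us.foldl stepA d).getD k [] = d.getD k [] ++ memberF us k := by
  induction us generalizing d with
  | nil => simp [memberF]
  | cons u us ih =>
    rw [List.foldl_cons]
    have hF : memberF (u :: us) k =
        (if udept u = some k then [uname u] else []) ++ memberF us k := by
      simp [memberF]; split_ifs with hi <;> simp [hi]
    cases h : udept u with
    | none =>
      rw [show stepA d u = d by unfold stepA; rw [h], ih d hk, hF]
      simp [h]
    | some gn =>
      by_cases hc : d.contains gn = true
      · rw [show stepA d u = d.modify gn [] (fun l => l ++ [uname u]) by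
          unfold stepA; rw [h]; simp [hc]]
        rw [ih _ (by rw [PySem.Dict.keys_modify, PySem.Dict.keys_insert_of_contains _ _ hc]; exact hk), PySem.Dict.getD_modify, hF]
        by_cases hkg : k = gn
        · subst hkg; simp [h]
        · have : ¬ (udept u = some k) := by rw [h]; intro hh; exact hkg (Option.some.inj hh).symm
          simp [hkg, this]
      · rw [show stepA d u = d by unfold stepA; rw [h]; simp [hc], ih d hk, hF]
        have : ¬ (udept u = some k) := by
          rw [h]; intro hh
          have hgk : gn ∈ d.keys := (Option.some.inj hh) ▸ hk
          rw [← PySem.Dict.contains_iff_mem_keys] at hgk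
          exact hc hgk
        simp [this]

-- A's seeding loop only stores empty lists
theorem getD_seed (gs : List (List (String × String)))
    (d : PySem.Dict String (List String)) (k : String) (hd : d.getD k [] = []) :
    (gs.foldl (fun d g => d.insert (gname g) []) d).getD k [] = [] := by
  induction gs generalizing d with
  | nil => exact hd
  | cons g gs ih =>
    rw [List.foldl_cons]
    exact ih _ (by rw [PySem.Dict.getD_insert]; split_ifs <;> simp [hd])

-- B's group loop stores memberF at every key it touches
theorem getD_altfold (users gs : List (List (String × String)))
    (d : PySem.Dict String (List String)) (k : String) :
    (gs.foldl (fun d g => d.insert (gname g) (memberF users (gname g))) d).getD k []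
      = if k ∈ gs.map gname then memberF users k else d.getD k [] := by
  induction gs generalizing d with
  | nil => simp
  | cons g gs ih =>
    rw [List.foldl_cons, ih]
    by_cases h1 : k ∈ gs.map gname
    · simp [h1]
    · by_cases h2 : k = gname g
      · subst h2; simp [h1]
      · simp [h1, h2, PySem.Dict.getD_insert]

-- both sides produce the same items list
theorem ports_eq (users groups : List (List (String × String))) :
    (users.foldl stepA
      (groups.foldl (fun d g => d.insert (gname g) []) PySem.Dict.empty)).items
    = (groups.foldl (fun d g => d.insert (gname g) (memberF users (gname g)))
        PySem.Dict.empty).items := by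
  have hkA : (groups.foldl (fun d g => d.insert (gname g) []) (PySem.Dict.empty : PySem.Dict String (List String))).keys
      = PySem.Set.ofList (groups.map gname) := by
    rw [PySem.Dict.keys_foldl_insert_key groups gname (fun _ _ => []),
        PySem.Dict.keys_empty, PySem.Set.update_nil_left]
  have hkB : (groups.foldl (fun d g => d.insert (gname g) (memberF users (gname g))) (PySem.Dict.empty : PySem.Dict String (List String))).keys
      = PySem.Set.ofList (groups.map gname) := by
    rw [PySem.Dict.keys_foldl_insert_key groups gname (fun _ g => memberF users (gname g)),
        PySem.Dict.keys_empty, PySem.Set.update_nil_left]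
  have hndA : (groups.foldl (fun d g => d.insert (gname g) []) (PySem.Dict.empty : PySem.Dict String (List String))).keys.Nodup :=
    PySem.Dict.nodup_keys_foldl_insert_key groups gname (fun _ _ => []) _ PySem.Dict.nodup_keys_empty
  have hndB : (groups.foldl (fun d g => d.insert (gname g) (memberF users (gname g))) (PySem.Dict.empty : PySem.Dict String (List String))).keys.Nodup :=
    PySem.Dict.nodup_keys_foldl_insert_key groups gname (fun _ g => memberF users (gname g)) _ PySem.Dict.nodup_keys_empty
  rw [PySem.Dict.items_eq_map_keys _ (by rw [keysA]; exact hndA) [],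
      PySem.Dict.items_eq_map_keys _ hndB [], keysA, hkA, hkB]
  apply List.map_congr_left
  intro k hk
  rw [PySem.Set.mem_ofList] at hk
  have hkmem : k ∈ (groups.foldl (fun d g => d.insert (gname g) []) (PySem.Dict.empty : PySem.Dict String (List String))).keys := by
    rw [hkA, PySem.Set.mem_ofList]; exact hk
  rw [getDA _ _ _ hkmem, getD_seed _ _ _ (PySem.Dict.getD_empty _ _), getD_altfold]
  simp [hk]

-- ===== VERDICT (by name: the statement is the Claim_ definition above) =====
theorem generate_group_memberships_spec : Claim_equal_generate_group_memberships := by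
  intro users groups _ _
  show generate_group_memberships users groups = generate_group_memberships_alt users groups
  unfold generate_group_memberships generate_group_memberships_alt
  simp only [dept_eq]
  exact ports_eq users groups
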